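-- pv_equiv track=rewrite | github.com/KazukiOnodera/KaggleDays | py/utils_nlp.py | triterms
-- ===== SOURCE A (Python) =====
-- def unigrams(words):
--     """
--         Input: a list of words, e.g., ["I", "am", "Denny"]
--         Output: a list of unigram
--     """
--     assert type(words) == list
--     return words
--
-- def uniterms(words):
--     return unigrams(words)
--
-- def biterms(words, join_string):
--     """
--         Input: a list of words, e.g., ["I", "am", "Denny", "boy"]
--         Output: a list of biterm, e.g., ["I_am", "I_Denny", "I_boy", "am_Denny", "am_boy", "Denny_boy"]
--         I use _ as join_string for this example.
--     """
--     assert type(words) == list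
--     L = len(words)
--     if L > 1:
--         lst = []
--         for i in range(L-1):
--             for j in range(i+1,L):
--                 lst.append( join_string.join([words[i], words[j]]) )
--     else:
--         # set it as uniterm
--         lst = uniterms(words)
--     return lst
--
-- def triterms(words, join_string):
--     """
--         Input: a list of words, e.g., ["I", "am", "Denny", "boy"]
--         Output: a list of triterm, e.g., ["I_am_Denny", "I_am_boy", "I_Denny_boy", "am_Denny_boy"]
--         I use _ as join_string for this example.
--     """
--     assert type(words) == list
--     L = len(words)
--     if L > 2:
--         lst = []
--         for i in range(L-2):
--             for j in range(i+1,L-1):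
--                 for k in range(j+1,L):
--                     lst.append( join_string.join([words[i], words[j], words[k]]) )
--     else:
--         # set it as biterm
--         lst = biterms(words, join_string)
--     return lst
-- ===== SOURCE B (Python) =====
-- def _pairs(ws, join_string):
--     # all 2-combinations of ws (in order), recursively: head paired with each later word, then recurse on the tail
--     if len(ws) < 2:
--         return []
--     head, rest = ws[0], ws[1:]
--     return [join_string.join([head, x]) for x in rest] + _pairs(rest, join_string)
--
-- def _triples(ws, join_string):
--     # all 3-combinations: head prefixed onto each pair of the tail, then recurse on the tail
--     if len(ws) < 3:
--         return []
--     head, rest = ws[0], ws[1:]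
--     return [join_string.join([head, p]) for p in _pairs(rest, join_string)] + _triples(rest, join_string)
--
-- def triterms(words, join_string):
--     if len(words) > 2:
--         return _triples(words, join_string)
--     if len(words) > 1:
--         return _pairs(words, join_string)
--     return words
-- ===== Notes on version B (the rewrite author's own statement) =====
-- stated objective: alternative
-- what changed: Replaces A's index-based triple-nested loop (and biterms' double loop) with structural recursion on the word list: each head word is prefixed onto the recursively built pairs of its tail, and the result is the concatenation over successive tails.
import Mathlib
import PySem

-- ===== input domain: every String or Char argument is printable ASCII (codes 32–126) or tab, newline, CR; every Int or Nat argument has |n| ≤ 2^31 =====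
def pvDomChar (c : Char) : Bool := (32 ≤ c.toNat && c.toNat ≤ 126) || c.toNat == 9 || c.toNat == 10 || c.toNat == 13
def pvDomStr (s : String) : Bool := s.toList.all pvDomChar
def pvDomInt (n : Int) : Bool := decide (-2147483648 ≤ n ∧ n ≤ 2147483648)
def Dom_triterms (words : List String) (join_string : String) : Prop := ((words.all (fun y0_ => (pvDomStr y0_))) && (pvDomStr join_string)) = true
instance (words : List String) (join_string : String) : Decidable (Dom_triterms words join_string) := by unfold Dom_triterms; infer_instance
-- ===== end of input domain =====

-- B replaces A's index-based nested loops by structural recursion on the word list (return value only; neither version mutates).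

-- ===== PORT A =====
def unigramsA (words : List String) : List String := words
def unitermsA (words : List String) : List String := unigramsA words

def bitermsA (words : List String) (join_string : String) : List String :=
  let L : Int := words.length
  if L > 1 then
    (PySem.List.pyRange 0 (L - 1)).foldl (fun lst i =>
      (PySem.List.pyRange (i + 1) L).foldl (fun lst j =>
        lst ++ [PySem.Str.join join_string
          [PySem.List.pyGetD words i "", PySem.List.pyGetD words j ""]]) lst) []
  else unitermsA words

def triterms (words : List String) (join_string : String) : List String :=
  let L : Int := words.length
  if L > 2 then
    (PySem.List.pyRange 0 (L - 2)).foldl (fun lst i =>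
      (PySem.List.pyRange (i + 1) (L - 1)).foldl (fun lst j =>
        (PySem.List.pyRange (j + 1) L).foldl (fun lst k =>
          lst ++ [PySem.Str.join join_string
            [PySem.List.pyGetD words i "", PySem.List.pyGetD words j "",
             PySem.List.pyGetD words k ""]]) lst) lst) []
  else bitermsA words join_string

-- ===== PORT B =====
def pairsB (ws : List String) (join_string : String) : List String :=
  match ws with
  | [] => []
  | [_] => []
  | head :: x :: rest =>
      (x :: rest).map (fun y => PySem.Str.join join_string [head, y]) ++ pairsB (x :: rest) join_string

def triplesB (ws : List String) (join_string : String) : List String :=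
  match ws with
  | [] => []
  | [_] => []
  | [_, _] => []
  | head :: x :: y :: rest =>
      (pairsB (x :: y :: rest) join_string).map
        (fun p => PySem.Str.join join_string [head, p]) ++ triplesB (x :: y :: rest) join_string

def triterms_alt (words : List String) (join_string : String) : List String :=
  if words.length > 2 then triplesB words join_string
  else if words.length > 1 then pairsB words join_string
  else words

-- ===== PRECONDITION & SPEC =====
def Spec_triterms (words : List String) (join_string : String) (out : List String) : Prop := out = triterms_alt words join_string
instance (words : List String) (join_string : String) (out : List String) : Decidable (Spec_triterms words join_string out) := by unfold Spec_triterms; infer_instance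

-- ===== CLAIM (what is proved, stated in full; the proofs are below) =====
def Claim_equal_triterms : Prop := ∀ (words : List String) (join_string : String), Dom_triterms words join_string → Spec_triterms words join_string (triterms words join_string)

-- ===== LEMMAS AND PROOFS =====

-- pyRange with step 1 over Nat-cast bounds, as a mapped List.range
lemma pyRange_natCast_eq (a b : Nat) :
    PySem.List.pyRange (a : Int) (b : Int) = (List.range (b - a)).map (fun k => ((a + k : Nat) : Int)) := by
  unfold PySem.List.pyRange
  norm_num
  split_ifs with h
  · rfl
  · have : b - a = 0 := by omega
    simp [this]

lemma pyRange_cast' (a b : Nat) :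
    PySem.List.pyRange ((a : Int) + 1) (b : Int) = (List.range (b - (a + 1))).map (fun k => ((a + 1 + k : Nat) : Int)) := by
  have h : ((a : Int) + 1) = ((a + 1 : Nat) : Int) := by push_cast; ring
  rw [h, pyRange_natCast_eq]

lemma map_getD_range {α β : Type} (xs : List α) (d : α) (f : α → β) :
    (List.range xs.length).map (fun k => f (xs.getD k d)) = xs.map f := by
  induction xs with
  | nil => rfl
  | cons x t ih =>
      simp [List.range_succ_eq_map, List.map_map]
      exact ih

-- joining with an already-joined pair flattens to the three-part join
lemma join_pair_flatten (js head b c : String) :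
    PySem.Str.join js [head, PySem.Str.join js [b, c]] = PySem.Str.join js [head, b, c] := by
  simp [PySem.Str.join, PySem.Chars.join_cons_cons, PySem.Chars.join_singleton]

-- A's biterm double loop, as Nat-indexed flatMap, equals pairsB
lemma pairsNat (ws : List String) (js : String) :
    (List.range (ws.length - 1)).flatMap (fun i =>
      (List.range (ws.length - (i + 1))).map (fun k =>
        PySem.Str.join js [ws.getD i "", ws.getD (i + 1 + k) ""]))
    = pairsB ws js := by
  induction ws with
  | nil => rfl
  | cons w t ih =>
      cases t with
      | nil => rfl
      | cons u r =>
          show (List.range (r.length + 1)).flatMap _ = _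
          rw [List.range_succ_eq_map, List.flatMap_cons, List.flatMap_map, pairsB]
          congr 1
          · -- head: i = 0
            show (List.range ((u :: r).length)).map
                (fun k => PySem.Str.join js [(w :: u :: r).getD 0 "", (w :: u :: r).getD (0 + 1 + k) ""]) = _
            have h : ∀ k, (0:Nat) + 1 + k = k + 1 := by omega
            simp only [List.getD_cons_zero, h, List.getD_cons_succ]
            exact map_getD_range (u :: r) "" (fun x => PySem.Str.join js [w, x])
          · -- tail: shift indices by one
            rw [← ih]
            show (List.range ((u :: r).length - 1)).flatMap _ = _
            apply List.flatMap_congr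
            intro i _
            show (List.range ((w :: u :: r).length - (i + 1 + 1))).map
                (fun k => PySem.Str.join js
                  [(w :: u :: r).getD (i + 1) "", (w :: u :: r).getD (i + 1 + 1 + k) ""]) = _
            have e1 : (w :: u :: r).length - (i + 1 + 1) = (u :: r).length - (i + 1) := by simp
            rw [e1]
            apply List.map_congr_left
            intro k _
            have e2 : i + 1 + 1 + k = (i + 1 + k) + 1 := by omega
            rw [e2, List.getD_cons_succ, List.getD_cons_succ]

-- A's triterm triple loop, as Nat-indexed flatMap, equals triplesB
lemma triplesNat (ws : List String) (js : String) :
    (List.range (ws.length - 2)).flatMap (fun i =>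
      (List.range (ws.length - 1 - (i + 1))).flatMap (fun j =>
        (List.range (ws.length - (i + 1 + j + 1))).map (fun k =>
          PySem.Str.join js [ws.getD i "", ws.getD (i + 1 + j) "", ws.getD (i + 1 + j + 1 + k) ""])))
    = triplesB ws js := by
  induction ws with
  | nil => rfl
  | cons w t ih =>
      match t with
      | [] => rfl
      | [_] => rfl
      | u :: v :: r =>
          show (List.range (r.length + 1)).flatMap _ = _
          rw [List.range_succ_eq_map, List.flatMap_cons, List.flatMap_map, triplesB]
          congr 1
          · -- head: i = 0, w prefixed onto the pairs of the tail
            rw [← pairsNat (u :: v :: r) js, List.map_flatMap]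
            show (List.range ((w :: u :: v :: r).length - 1 - (0 + 1))).flatMap _ = _
            have e0 : (w :: u :: v :: r).length - 1 - (0 + 1) = (u :: v :: r).length - 1 := by simp
            rw [e0]
            apply List.flatMap_congr
            intro j _
            show (List.range ((w :: u :: v :: r).length - (0 + 1 + j + 1))).map _ = _
            have e1 : (w :: u :: v :: r).length - (0 + 1 + j + 1) = (u :: v :: r).length - (j + 1) := by
              simp; omega
            rw [e1, List.map_map]
            apply List.map_congr_left
            intro k _
            show PySem.Str.join js
                [(w :: u :: v :: r).getD 0 "", (w :: u :: v :: r).getD (0 + 1 + j) "",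
                 (w :: u :: v :: r).getD (0 + 1 + j + 1 + k) ""] = _
            rw [show 0 + 1 + j + 1 + k = (j + 1 + k) + 1 from by omega,
                show 0 + 1 + j = j + 1 from by omega]
            simp only [Function.comp_apply, List.getD_cons_zero, List.getD_cons_succ]
            exact (join_pair_flatten js w _ _).symm
          · -- tail: shift indices by one
            rw [← ih]
            show (List.range ((u :: v :: r).length - 2)).flatMap _ = _
            apply List.flatMap_congr
            intro i _
            show (List.range ((w :: u :: v :: r).length - 1 - (i + 1 + 1))).flatMap _ = _
            have e1 : (w :: u :: v :: r).length - 1 - (i + 1 + 1) = (u :: v :: r).length - 1 - (i + 1) := by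
              simp
            rw [e1]
            apply List.flatMap_congr
            intro j _
            show (List.range ((w :: u :: v :: r).length - (i + 1 + 1 + j + 1))).map _ = _
            have e2 : (w :: u :: v :: r).length - (i + 1 + 1 + j + 1) = (u :: v :: r).length - (i + 1 + j + 1) := by
              simp; omega
            rw [e2]
            apply List.map_congr_left
            intro k _
            show PySem.Str.join js
                [(w :: u :: v :: r).getD (i + 1) "", (w :: u :: v :: r).getD (i + 1 + 1 + j) "",
                 (w :: u :: v :: r).getD (i + 1 + 1 + j + 1 + k) ""] = _
            rw [show i + 1 + 1 + j + 1 + k = (i + 1 + j + 1 + k) + 1 from by omega,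
                show i + 1 + 1 + j = (i + 1 + j) + 1 from by omega]
            simp only [List.getD_cons_succ]

-- A's biterm loops equal pairsB whenever the Python if-branch is taken
lemma bitermsA_eq_pairsB (ws : List String) (js : String) (h : 1 < ws.length) :
    bitermsA ws js = pairsB ws js := by
  unfold bitermsA
  rw [if_pos (by exact_mod_cast h)]
  simp only [PySem.List.foldl_append_singleton_eq_map, PySem.List.foldl_append_eq_flatMap,
    List.nil_append]
  rw [show ((ws.length : Int) - 1) = ((ws.length - 1 : Nat) : Int) from by omega,
    show (0 : Int) = ((0 : Nat) : Int) from rfl, pyRange_natCast_eq, List.flatMap_map]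
  rw [← pairsNat ws js]
  apply List.flatMap_congr
  intro i _
  simp only [Nat.zero_add, pyRange_cast', List.map_map]
  apply List.map_congr_left
  intro k _
  simp only [Function.comp_apply, PySem.List.pyGetD_natCast]

lemma tritermsA_eq_triplesB (ws : List String) (js : String) (h : 2 < ws.length) :
    triterms ws js = triplesB ws js := by
  unfold triterms
  rw [if_pos (by exact_mod_cast h)]
  simp only [PySem.List.foldl_append_singleton_eq_map, PySem.List.foldl_append_eq_flatMap,
    List.nil_append]
  rw [show ((ws.length : Int) - 2) = ((ws.length - 2 : Nat) : Int) from by omega,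
    show ((ws.length : Int) - 1) = ((ws.length - 1 : Nat) : Int) from by omega,
    show (0 : Int) = ((0 : Nat) : Int) from rfl, pyRange_natCast_eq, List.flatMap_map]
  rw [← triplesNat ws js]
  apply List.flatMap_congr
  intro i _
  simp only [Nat.zero_add, pyRange_cast', List.flatMap_map]
  apply List.flatMap_congr
  intro j _
  simp only [List.map_map]
  apply List.map_congr_left
  intro k _
  simp only [Function.comp_apply, PySem.List.pyGetD_natCast]

-- ===== VERDICT (by name: the statement is the Claim_ definition above) =====
theorem triterms_spec : Claim_equal_triterms := by
  intro words js _
  unfold Spec_triterms triterms_alt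
  by_cases h3 : 2 < words.length
  · rw [if_pos h3]
    exact tritermsA_eq_triplesB words js h3
  · rw [if_neg h3]
    unfold triterms
    rw [if_neg (by exact_mod_cast h3)]
    by_cases h2 : 1 < words.length
    · rw [if_pos h2]
      exact bitermsA_eq_pairsB words js h2
    · rw [if_neg h2]
      unfold bitermsA
      rw [if_neg (by exact_mod_cast h2)]
      rfl
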